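-- pv_equiv track=rewrite | github.com/Ali-E/muse_rep | algs_causal_forgetset/compute_ps_cross_dataset_clean_site_backup.py | all_corruptions_by_id
-- ===== SOURCE A (Python) =====
-- from typing import Dict, List, Optional, Tuple
--
-- def all_corruptions_by_id(rows: List[Dict[str, str]], chunk_format: bool = False) -> Dict[str, List[Dict[str, str]]]:
--     """Get ALL corruptions per ID from target corruptions (excluding 'none').
--
--     For chunk_format, uses chunk_id instead of id.
--     Returns a dict mapping ID -> list of corruption rows.
--     """
--     corruptions: Dict[str, List[Dict[str, str]]] = {}
--     id_field = "chunk_id" if chunk_format else "id"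
--     for r in rows:
--         tid = str(r.get(id_field, ""))
--         corruption_type = r.get("corruption", "")
--         # Skip 'none' corruptions (clean versions)
--         if corruption_type == "none":
--             continue
--         if tid not in corruptions:
--             corruptions[tid] = []
--         corruptions[tid].append(r)
--     return corruptions
-- ===== SOURCE B (Python) =====
-- def all_corruptions_by_id(rows, chunk_format=False):
--     """Get ALL corruptions per ID from target corruptions (excluding 'none')."""
--     id_field = "chunk_id" if chunk_format else "id"
--     kept = [r for r in rows if r.get("corruption", "") != "none"]
--     ids = list(dict.fromkeys(str(r.get(id_field, "")) for r in kept))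
--     return {k: [r for r in kept if str(r.get(id_field, "")) == k] for k in ids}
-- ===== Notes on version B (the rewrite author's own statement) =====
-- stated objective: alternative
-- what changed: Replaces the single-pass hash-grouping loop (membership test + in-place append per row) by a three-stage pipeline: filter the non-'none' rows once, dedup their ids in first-occurrence order, then build each group by a per-id filter comprehension.
import Mathlib
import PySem

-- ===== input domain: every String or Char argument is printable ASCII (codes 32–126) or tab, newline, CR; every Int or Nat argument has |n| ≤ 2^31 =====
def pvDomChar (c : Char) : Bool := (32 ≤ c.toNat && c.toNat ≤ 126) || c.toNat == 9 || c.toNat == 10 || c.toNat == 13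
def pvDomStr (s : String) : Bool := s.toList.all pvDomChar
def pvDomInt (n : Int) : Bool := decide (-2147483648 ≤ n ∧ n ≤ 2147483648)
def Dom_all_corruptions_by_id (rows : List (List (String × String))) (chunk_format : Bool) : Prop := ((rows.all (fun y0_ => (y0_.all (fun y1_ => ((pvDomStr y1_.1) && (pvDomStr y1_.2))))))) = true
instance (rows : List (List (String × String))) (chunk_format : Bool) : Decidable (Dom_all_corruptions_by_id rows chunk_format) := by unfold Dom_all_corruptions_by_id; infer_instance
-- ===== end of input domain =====

-- B replaces A's single-pass hash-grouping loop by a filter / dedup-ids / per-id-filter pipeline (alternative decomposition, same results).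


-- ===== PORT A =====
-- literal port of A: one dict-building loop; 'tid not in corruptions' → insert [], then append.
def all_corruptions_by_id (rows : List (List (String × String))) (chunk_format : Bool) : List (String × List (List (String × String))) :=
  let id_field := if chunk_format then "chunk_id" else "id"
  let corruptions : PySem.Dict String (List (List (String × String))) :=
    rows.foldl (fun d r =>
      let tid := (PySem.Dict.mk r).getD id_field ""
      let corruption_type := (PySem.Dict.mk r).getD "corruption" ""
      if corruption_type == "none" then d
      else
        let d := if d.contains tid then d else d.insert tid []
        d.modify tid [] (fun v => v ++ [r])) PySem.Dict.empty
  corruptions.items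

-- ===== PORT B =====
-- port of B: filter the non-'none' rows, dedup their ids in first-occurrence order, build the dict by one insert per id.
def all_corruptions_by_id_alt (rows : List (List (String × String))) (chunk_format : Bool) : List (String × List (List (String × String))) :=
  let id_field := if chunk_format then "chunk_id" else "id"
  let kept := rows.filter (fun r => !((PySem.Dict.mk r).getD "corruption" "" == "none"))
  let ids := PySem.List.dedup (kept.map (fun r => (PySem.Dict.mk r).getD id_field ""))
  (ids.foldl (fun d k =>
      d.insert k (kept.filter (fun r => (PySem.Dict.mk r).getD id_field "" == k)))
    (PySem.Dict.empty : PySem.Dict String (List (List (String × String))))).items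

-- ===== PRECONDITION & SPEC =====
def Spec_all_corruptions_by_id (rows : List (List (String × String))) (chunk_format : Bool) (out : List (String × List (List (String × String)))) : Prop := out = all_corruptions_by_id_alt rows chunk_format
instance (rows : List (List (String × String))) (chunk_format : Bool) (out : List (String × List (List (String × String)))) : Decidable (Spec_all_corruptions_by_id rows chunk_format out) := by unfold Spec_all_corruptions_by_id; infer_instance

-- ===== CLAIM (what is proved, stated in full; the proofs are below) =====
def Claim_equal_all_corruptions_by_id : Prop := ∀ (rows : List (List (String × String))) (chunk_format : Bool), Dom_all_corruptions_by_id rows chunk_format → Spec_all_corruptions_by_id rows chunk_format (all_corruptions_by_id rows chunk_format)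

-- ===== LEMMAS AND PROOFS =====

-- 'insert [] if absent, then append' is exactly 'modify with default []'
theorem insert_then_modify {ν : Type} (d : PySem.Dict String ν) (k : String) (dflt : ν) (f : ν → ν) :
    (if d.contains k then d else d.insert k dflt).modify k dflt f = d.modify k dflt f := by
  by_cases h : d.contains k
  · simp [h]
  · have h' : d.contains k = false := eq_false_of_ne_true h
    simp only [h', Bool.false_eq_true, if_false, PySem.Dict.modify,
      PySem.Dict.getD_insert_self, PySem.Dict.insert_insert_self,
      PySem.Dict.getD_of_not_contains d dflt h']

-- a fold that skips rows failing p equals a fold over the filtered list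
theorem foldl_skip_eq_filter {α σ : Type} (q : α → Bool) (f : σ → α → σ) (l : List α) (s : σ) :
    l.foldl (fun s a => if q a then s else f s a) s = (l.filter (fun a => !(q a))).foldl f s := by
  induction l generalizing s with
  | nil => rfl
  | cons a t ih =>
    by_cases h : q a <;> simp [h, ih]

-- the grouping fold of A and the filter/dedup/insert pipeline of B build the same items list
theorem grouping_items_eq (key co : List (String × String) → String)
    (rows : List (List (String × String))) :
    (rows.foldl (fun d r =>
        if co r == "none" then d
        else (if d.contains (key r) then d else d.insert (key r) []).modify (key r) []
          (fun v => v ++ [r]))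
      (PySem.Dict.empty : PySem.Dict String (List (List (String × String))))).items
    = ((PySem.List.dedup ((rows.filter (fun r => !(co r == "none"))).map key)).foldl
        (fun d k => d.insert k ((rows.filter (fun r => !(co r == "none"))).filter
          (fun r => key r == k)))
        (PySem.Dict.empty : PySem.Dict String (List (List (String × String))))).items := by
  rw [foldl_skip_eq_filter (fun r => co r == "none")]
  have h1 : (fun (d : PySem.Dict String (List (List (String × String)))) r =>
      (if d.contains (key r) then d else d.insert (key r) []).modify (key r) []
        (fun v => v ++ [r]))
      = fun d r => d.modify (key r) [] (fun v => v ++ [r]) := by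
    funext d r; exact insert_then_modify d (key r) [] (fun v => v ++ [r])
  rw [h1]
  set kept := rows.filter (fun r => !(co r == "none")) with hkept
  have hnd : ((kept.foldl (fun d r => d.modify (key r) [] (fun v => v ++ [r]))
      (PySem.Dict.empty : PySem.Dict String (List (List (String × String))))).keys).Nodup :=
    PySem.Dict.nodup_keys_foldl_modify_key kept key [] (fun _ r v => v ++ [r]) _
      (by simp [PySem.Dict.keys_empty])
  rw [PySem.Dict.items_eq_map_keys _ hnd []]
  have hkeys : (kept.foldl (fun d r => d.modify (key r) [] (fun v => v ++ [r]))
      (PySem.Dict.empty : PySem.Dict String (List (List (String × String))))).keys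
      = PySem.List.dedup (kept.map key) := by
    rw [PySem.Dict.keys_foldl_modify_key kept key [] (fun _ r v => v ++ [r])]
    simp [PySem.Dict.keys_empty, PySem.List.dedup_eq_ofList]
    rfl
  have hget : ∀ c, (kept.foldl (fun d r => d.modify (key r) [] (fun v => v ++ [r]))
      (PySem.Dict.empty : PySem.Dict String (List (List (String × String))))).getD c []
      = kept.filter (fun r => key r == c) := by
    intro c
    have : kept.foldl (fun d r => d.modify (key r) [] (fun v => v ++ [r]))
        (PySem.Dict.empty : PySem.Dict String (List (List (String × String))))
        = (kept.map (fun r => (key r, r))).foldl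
            (fun d p => d.modify p.1 [] (fun v => v ++ [p.2])) PySem.Dict.empty := by
      rw [List.foldl_map]
    rw [this, PySem.Dict.getD_foldl_modify_append]
    simp [List.filter_map, Function.comp_def]
  have hfresh : ∀ a ∈ PySem.List.dedup (kept.map key),
      (PySem.Dict.empty : PySem.Dict String (List (List (String × String)))).contains a = false := by
    intro a _; simp [PySem.Dict.contains_empty]
  have hnodup : ((PySem.List.dedup (kept.map key)).map (fun k => k)).Nodup := by
    simp [PySem.List.nodup_dedup]
  rw [PySem.Dict.items_foldl_insert_fresh (PySem.List.dedup (kept.map key)) (fun k => k)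
    (fun k => kept.filter (fun r => key r == k)) PySem.Dict.empty hfresh hnodup]
  simp only [hkeys, hget]
  rfl

theorem all_corruptions_by_id_spec : Claim_equal_all_corruptions_by_id := by
  intro rows chunk_format _
  show all_corruptions_by_id rows chunk_format = all_corruptions_by_id_alt rows chunk_format
  exact grouping_items_eq
    (fun r => (PySem.Dict.mk r).getD (if chunk_format then "chunk_id" else "id") "")
    (fun r => (PySem.Dict.mk r).getD "corruption" "") rows
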